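-- pv_equiv track=rewrite | github.com/rjherrera/IIC2283 | T1/friendly_permutations.py | friendly_naive
-- ===== SOURCE A (Python) =====
-- from math import ceil, factorial
--
-- def ncr(n, r):
--     if n - r < 0:
--         return 1
--     return factorial(n) // (factorial(r) * factorial(n - r))
--
-- def friendly_naive(n):
--     N = len(n)
--     F = [n.count(str(i)) for i in range(10)]
--     P = ceil(N / 2)  # mandando ceil(N/2) a los pares
--
--     DP = [[[0 for _ in range(11)] for _ in range(P + 1)] for _ in range(11)]
--     DP[10][0][0] = 1
--
--     # como repartir digitos a P posiciones pares y a I posiciones impares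
--     for k in range(9, -1, -1):
--         f_k = F[k]
--         f_no_k = sum(F[i] for i in range(k, 10))
--         # poniendo el digito k -> me quedan por poner todos los digitos >= k
--         for p in range(P + 1):
--             for x in range(11):
--                 for z in range(min(f_k, p) + 1):
--                     # z = to_even -> de los que puedo repartir, cuantos a pares
--                     even_addition = z * k  # lo que agrego a la suma de pares
--                     odd_addition = (f_k - z) * k  # ''' a la suma de de impares
--                     change = even_addition - odd_addition
--
--                     new_p = p - z  # p: cuantos en pos par me quedan por poner
--                     new_x = (x + change) % 11  # resto: antiguo + el cambio %11
--
--                     to_even = z  # cuantos numeros k se van a pares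
--                     to_odd = f_k - z  # cuantos numeros k se van a pares
--
--                     ways_of_even = ncr(p, to_even)
--                     ways_of_odd = ncr(f_no_k - p, to_odd)
--                     # f_no_k - p: los que me quedan por poner tras poner los p
--                     next_dp = DP[k + 1][new_p][new_x]
--                     DP[k][p][x] += ways_of_even * ways_of_odd * next_dp
--     return DP[0][P][0]
-- ===== SOURCE B (Python) =====
-- from math import comb
--
-- def friendly_naive(n):
--     F = [0] * 10
--     for c in n:
--         if '0' <= c <= '9':
--             F[ord(c) - 48] += 1
--
--     def count(items, p, x, rest):
--         # items: remaining (digit, multiplicity) pairs; p: even slots still to fill;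
--         # x: residue (mod 11) still required; rest: digits still to place
--         if not items:
--             return 1 if p == 0 and x == 0 else 0
--         (d, f), tail = items[0], items[1:]
--         total = 0
--         for z in range(min(f, p) + 1):
--             if f - z <= rest - p:
--                 total += comb(p, z) * comb(rest - p, f - z) \
--                     * count(tail, p - z, (x + (2 * z - f) * d) % 11, rest - f)
--         return total
--
--     P = (len(n) + 1) // 2
--     return count(list(enumerate(F)), P, 0, sum(F))
-- ===== Notes on version B (the rewrite author's own statement) =====
-- stated objective: simpler
-- what changed: Replaces A's bottom-up 11x(P+1)x11 DP table filled with factorial-built ncr values (including many unreachable states) by a direct top-down recursion over the (digit, multiplicity) pairs with feasibility pruning and math.comb, with a single-pass digit tally instead of ten n.count scans; no table, no factorials.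
import Mathlib
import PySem

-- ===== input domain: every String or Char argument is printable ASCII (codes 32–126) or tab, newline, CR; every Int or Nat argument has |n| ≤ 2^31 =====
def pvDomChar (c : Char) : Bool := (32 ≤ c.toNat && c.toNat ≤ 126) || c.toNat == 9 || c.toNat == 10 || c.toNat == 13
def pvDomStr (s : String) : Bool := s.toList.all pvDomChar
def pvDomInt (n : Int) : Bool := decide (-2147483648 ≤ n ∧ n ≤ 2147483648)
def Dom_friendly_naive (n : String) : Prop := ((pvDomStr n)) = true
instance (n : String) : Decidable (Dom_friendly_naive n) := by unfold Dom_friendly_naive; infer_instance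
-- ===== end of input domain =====

-- B replaces A's bottom-up 11×(P+1)×11 table (with factorial-built binomials) by a direct
-- top-down recursion over the (digit, multiplicity) pairs with feasibility pruning and math.comb
-- (objective: simpler; no speed claim).

-- ===== PORT A =====
-- A-side helpers: the 3-dimensional Python list DP and its cell access/update
abbrev PvL3 := List (List (List Int))

def pvGet3 (dp : PvL3) (k p x : Nat) : Int := ((dp.getD k []).getD p []).getD x 0

def pvSet3 (dp : PvL3) (k p x : Nat) (v : Int) : PvL3 :=
  dp.modify k (fun l2 => l2.modify p (fun l1 => l1.set x v))

-- Python ncr: factorial-based; `factorial` is only ever applied to nonnegative arguments here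
def pvNcr (n r : Int) : Int :=
  if n - r < 0 then 1
  else PySem.Int.floordiv ((Nat.factorial n.toNat : Int))
        ((Nat.factorial r.toNat : Int) * (Nat.factorial (n - r).toNat : Int))

-- the innermost `for z in range(min(f_k, p) + 1)` body (k is the Python loop variable, an Int)
def pvBodyZ (k f_k f_no_k p x : Int) (dp : PvL3) (z : Int) : PvL3 :=
  let even_addition := z * k
  let odd_addition := (f_k - z) * k
  let change := even_addition - odd_addition
  let new_p := p - z
  let new_x := PySem.Int.mod (x + change) 11
  let ways_of_even := pvNcr p z
  let ways_of_odd := pvNcr (f_no_k - p) (f_k - z)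
  let next_dp := pvGet3 dp (k.toNat + 1) new_p.toNat new_x.toNat
  pvSet3 dp k.toNat p.toNat x.toNat
    (pvGet3 dp k.toNat p.toNat x.toNat + ways_of_even * ways_of_odd * next_dp)

def pvBodyX (k f_k f_no_k p : Int) (dp : PvL3) (x : Int) : PvL3 :=
  (PySem.List.pyRange 0 (min f_k p + 1) 1).foldl (pvBodyZ k f_k f_no_k p x) dp

def pvBodyP (k f_k f_no_k : Int) (dp : PvL3) (p : Int) : PvL3 :=
  (PySem.List.pyRange 0 11 1).foldl (pvBodyX k f_k f_no_k p) dp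

def pvBodyK (F : List Int) (P : Int) (dp : PvL3) (k : Int) : PvL3 :=
  let f_k := PySem.List.pyGetD F k 0
  let f_no_k := ((PySem.List.pyRange k 10 1).map (fun i => PySem.List.pyGetD F i 0)).foldl (· + ·) 0
  (PySem.List.pyRange 0 (P + 1) 1).foldl (pvBodyP k f_k f_no_k) dp

def friendly_naive (n : String) : Int :=
  let N : Int := PySem.Str.len n
  let F : List Int := (PySem.List.pyRange 0 10 1).map (fun i => (PySem.Str.count n (PySem.Int.toStr i) : Int))
  -- P = ceil(N/2); Python computes it through float ceil, exact on every length: (N+1)//2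
  let P : Int := PySem.Int.floordiv (N + 1) 2
  let dp0 : PvL3 := List.replicate 11 (List.replicate (P.toNat + 1) (List.replicate 11 (0 : Int)))
  let dp1 := pvSet3 dp0 10 0 0 1
  let dpF := (PySem.List.pyRange 9 (-1) (-1)).foldl (pvBodyK F P) dp1
  pvGet3 dpF 0 P.toNat 0

-- ===== PORT B =====
-- B-side helpers: single-pass digit tally, math.comb, and the pruned recursion
def pvTally (n : String) : List Int :=
  n.toList.foldl
    (fun F c => if '0' ≤ c ∧ c ≤ '9' then F.modify (c.toNat - 48) (· + 1) else F)
    (List.replicate 10 (0 : Int))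

-- math.comb; only ever applied with 0 ≤ b ≤ a (Python comb raises outside that)
def pvComb (a b : Int) : Int := (Nat.choose a.toNat b.toNat : Int)

def pvCount : List (Int × Int) → Int → Int → Int → Int
  | [], p, x, _ => if p = 0 ∧ x = 0 then 1 else 0
  | (d, f) :: tail, p, x, rest =>
      (PySem.List.pyRange 0 (min f p + 1) 1).foldl
        (fun total z =>
          if f - z ≤ rest - p then
            total + pvComb p z * pvComb (rest - p) (f - z) *
              pvCount tail (p - z) (PySem.Int.mod (x + (2 * z - f) * d) 11) (rest - f)
          else total) 0

def friendly_naive_alt (n : String) : Int :=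
  let F := pvTally n
  let P : Int := PySem.Int.floordiv (PySem.Str.len n + 1) 2
  pvCount (PySem.List.enumerate F) P 0 (F.foldl (· + ·) 0)

-- ===== PRECONDITION & SPEC =====
def Spec_friendly_naive (n : String) (out : Int) : Prop := out = friendly_naive_alt n
instance (n : String) (out : Int) : Decidable (Spec_friendly_naive n out) := by unfold Spec_friendly_naive; infer_instance

-- ===== CLAIM (what is proved, stated in full; the proofs are below) =====
def Claim_equal_friendly_naive : Prop := ∀ (n : String), Dom_friendly_naive n → Spec_friendly_naive n (friendly_naive n)

-- ===== LEMMAS AND PROOFS =====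

theorem pvGetD_modify {α : Type} (l : List α) (i j : Nat) (f : α → α) (d : α) :
    (l.modify i f).getD j d = if i = j ∧ j < l.length then f (l.getD j d) else l.getD j d := by
  by_cases hj : j < l.length
  · simp only [List.getD_eq_getElem?_getD, List.getElem?_modify, List.getElem?_eq_getElem hj]
    split_ifs <;> simp_all
  · simp only [List.getD_eq_getElem?_getD, List.getElem?_modify,
      List.getElem?_eq_none (by omega : l.length ≤ j)]
    split_ifs <;> simp_all

theorem pvGetD_set {α : Type} (l : List α) (i j : Nat) (v : α) (d : α) :
    (l.set i v).getD j d = if i = j ∧ j < l.length then v else l.getD j d := by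
  by_cases hj : j < l.length
  · simp only [List.getD_eq_getElem?_getD, List.getElem?_set, List.getElem?_eq_getElem hj]
    split_ifs <;> simp_all
  · simp only [List.getD_eq_getElem?_getD, List.getElem?_set,
      List.getElem?_eq_none (by omega : l.length ≤ j)]
    split_ifs <;> simp_all

theorem pvGet3_set3 (dp : PvL3) (k p x : Nat) (v : Int) (k' p' x' : Nat) :
    pvGet3 (pvSet3 dp k p x v) k' p' x' =
      if k = k' ∧ p = p' ∧ x = x' ∧ k < dp.length ∧ p < (dp.getD k []).length
          ∧ x < ((dp.getD k []).getD p []).length then v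
      else pvGet3 dp k' p' x' := by
  unfold pvGet3 pvSet3
  rw [pvGetD_modify]
  by_cases hk : k = k' ∧ k' < dp.length
  · rw [if_pos hk]
    obtain ⟨hk, hkl⟩ := hk; subst hk
    rw [pvGetD_modify]
    by_cases hp : p = p' ∧ p' < (dp.getD k []).length
    · rw [if_pos hp]
      obtain ⟨hp, hpl⟩ := hp; subst hp
      rw [pvGetD_set]
      by_cases hx : x = x' ∧ x' < ((dp.getD k []).getD p []).length
      · rw [if_pos hx, if_pos ⟨rfl, rfl, hx.1, hkl, hpl, hx.1 ▸ hx.2⟩]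
      · rw [if_neg hx, if_neg (by rintro ⟨-, -, rfl, -, -, h6⟩; exact hx ⟨rfl, h6⟩)]
    · rw [if_neg hp, if_neg (by rintro ⟨-, rfl, -, -, h5, -⟩; exact hp ⟨rfl, h5⟩)]
  · rw [if_neg hk, if_neg (by rintro ⟨rfl, -, -, h4, -, -⟩; exact hk ⟨rfl, h4⟩)]


def pvShape (Pn : Nat) (dp : PvL3) : Prop :=
  dp.length = 11 ∧ ∀ j, j < 11 →
    (dp.getD j []).length = Pn + 1 ∧ ∀ q, q < Pn + 1 → ((dp.getD j []).getD q []).length = 11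

theorem pvShape_set3 {Pn : Nat} {dp : PvL3} (h : pvShape Pn dp) (k p x : Nat) (v : Int) :
    pvShape Pn (pvSet3 dp k p x v) := by
  obtain ⟨h1, h2⟩ := h
  constructor
  · simp [pvSet3, h1]
  · intro j hj
    unfold pvSet3
    rw [pvGetD_modify]
    split_ifs with hc
    · refine ⟨by rw [List.length_modify]; exact (h2 j hj).1, fun q hq => ?_⟩
      rw [pvGetD_modify]
      split_ifs with hd
      · rw [List.length_set]; exact (h2 j hj).2 q hq
      · exact (h2 j hj).2 q hq
    · exact h2 j hj

theorem pvGet3_set3_self {Pn : Nat} {dp : PvL3} (h : pvShape Pn dp) {k p x : Nat} (v : Int)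
    (hk : k < 11) (hp : p < Pn + 1) (hx : x < 11) :
    pvGet3 (pvSet3 dp k p x v) k p x = v := by
  rw [pvGet3_set3]
  have b1 : k < dp.length := by rw [h.1]; exact hk
  have b2 : p < (dp.getD k []).length := by rw [(h.2 k hk).1]; exact hp
  have b3 : x < ((dp.getD k []).getD p []).length := by
    rw [(h.2 k hk).2 p (by rw [← (h.2 k hk).1]; exact b2)]; exact hx
  rw [if_pos ⟨rfl, rfl, rfl, b1, b2, b3⟩]

theorem pvGet3_set3_ne {dp : PvL3} {k p x : Nat} (v : Int) {k' p' x' : Nat}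
    (h : ¬(k = k' ∧ p = p' ∧ x = x')) :
    pvGet3 (pvSet3 dp k p x v) k' p' x' = pvGet3 dp k' p' x' := by
  rw [pvGet3_set3, if_neg (by tauto)]

def pvTermA (k f_k f_no_k p x : Int) (dp : PvL3) (z : Int) : Int :=
  pvNcr p z * pvNcr (f_no_k - p) (f_k - z) *
    pvGet3 dp (k.toNat + 1) (p - z).toNat (PySem.Int.mod (x + (z * k - (f_k - z) * k)) 11).toNat

theorem pvZfold (k f_k f_no_k p x : Int) (hk : 0 ≤ k) (hk10 : k.toNat < 10) (Pn : Nat)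
    (hp : 0 ≤ p) (hpP : p.toNat ≤ Pn) (hx : 0 ≤ x) (hx11 : x.toNat < 11) :
    ∀ (zs : List Int) (dp : PvL3), pvShape Pn dp →
      pvShape Pn (zs.foldl (pvBodyZ k f_k f_no_k p x) dp) ∧
      (∀ j q y, ¬(j = k.toNat ∧ q = p.toNat ∧ y = x.toNat) →
        pvGet3 (zs.foldl (pvBodyZ k f_k f_no_k p x) dp) j q y = pvGet3 dp j q y) ∧
      pvGet3 (zs.foldl (pvBodyZ k f_k f_no_k p x) dp) k.toNat p.toNat x.toNat =
        pvGet3 dp k.toNat p.toNat x.toNat + (zs.map (pvTermA k f_k f_no_k p x dp)).sum := by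
  intro zs
  induction zs with
  | nil => intro dp hdp; exact ⟨hdp, fun _ _ _ _ => rfl, by simp⟩
  | cons z0 tl ih =>
    intro dp hdp
    have hstep : tl.foldl (pvBodyZ k f_k f_no_k p x) (pvBodyZ k f_k f_no_k p x dp z0) =
        (z0 :: tl).foldl (pvBodyZ k f_k f_no_k p x) dp := rfl
    set dp1 := pvBodyZ k f_k f_no_k p x dp z0 with hdp1
    have hdp1e : dp1 = pvSet3 dp k.toNat p.toNat x.toNat
        (pvGet3 dp k.toNat p.toNat x.toNat + pvTermA k f_k f_no_k p x dp z0) := by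
      rw [hdp1]; rfl
    have hsh1 : pvShape Pn dp1 := by rw [hdp1e]; exact pvShape_set3 hdp _ _ _ _
    obtain ⟨ihs, ihne, ihcell⟩ := ih dp1 hsh1
    rw [← hstep]
    refine ⟨ihs, ?_, ?_⟩
    · intro j q y hne
      rw [ihne j q y hne, hdp1e, pvGet3_set3_ne _ (by tauto)]
    · rw [ihcell]
      have hc1 : pvGet3 dp1 k.toNat p.toNat x.toNat =
          pvGet3 dp k.toNat p.toNat x.toNat + pvTermA k f_k f_no_k p x dp z0 := by
        rw [hdp1e]; exact pvGet3_set3_self hdp _ (by omega) (by omega) (by omega)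
      have hterm : ∀ z, pvTermA k f_k f_no_k p x dp1 z = pvTermA k f_k f_no_k p x dp z := by
        intro z
        unfold pvTermA
        rw [hdp1e, pvGet3_set3_ne _ (by omega)]
      have hmap : (tl.map (pvTermA k f_k f_no_k p x dp1)) = tl.map (pvTermA k f_k f_no_k p x dp) := by
        exact List.map_congr_left (fun z _ => hterm z)
      rw [hmap, hc1]
      simp [List.map_cons]
      ring

theorem pvXfold (k f_k f_no_k p : Int) (hk : 0 ≤ k) (hk10 : k.toNat < 10) (Pn : Nat)
    (hp : 0 ≤ p) (hpP : p.toNat ≤ Pn) :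
    ∀ (xs : List Int) (dp : PvL3), pvShape Pn dp → xs.Nodup → (∀ x ∈ xs, 0 ≤ x ∧ x.toNat < 11) →
      pvShape Pn (xs.foldl (pvBodyX k f_k f_no_k p) dp) ∧
      (∀ j q y, ¬(j = k.toNat ∧ q = p.toNat ∧ ∃ x ∈ xs, y = x.toNat) →
        pvGet3 (xs.foldl (pvBodyX k f_k f_no_k p) dp) j q y = pvGet3 dp j q y) ∧
      (∀ x ∈ xs, pvGet3 (xs.foldl (pvBodyX k f_k f_no_k p) dp) k.toNat p.toNat x.toNat =
        pvGet3 dp k.toNat p.toNat x.toNat +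
          ((PySem.List.pyRange 0 (min f_k p + 1) 1).map (pvTermA k f_k f_no_k p x dp)).sum) := by
  intro xs
  induction xs with
  | nil => intro dp hdp _ _; exact ⟨hdp, fun _ _ _ _ => rfl, by simp⟩
  | cons x0 tl ih =>
    intro dp hdp hnd hmem
    obtain ⟨hx00, hx011⟩ := hmem x0 (by simp)
    have hstep : tl.foldl (pvBodyX k f_k f_no_k p) (pvBodyX k f_k f_no_k p dp x0) =
        (x0 :: tl).foldl (pvBodyX k f_k f_no_k p) dp := rfl
    set dp1 := pvBodyX k f_k f_no_k p dp x0 with hdp1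
    have hz := pvZfold k f_k f_no_k p x0 hk hk10 Pn hp hpP hx00 hx011
      (PySem.List.pyRange 0 (min f_k p + 1) 1) dp hdp
    obtain ⟨hzs, hzne, hzcell⟩ := hz
    have hdp1z : dp1 = (PySem.List.pyRange 0 (min f_k p + 1) 1).foldl
        (pvBodyZ k f_k f_no_k p x0) dp := rfl
    obtain ⟨ihs, ihne, ihcell⟩ := ih dp1 (hdp1z ▸ hzs) hnd.of_cons (fun x hx => hmem x (by simp [hx]))
    rw [← hstep]
    have toNat_inj : ∀ a b : Int, 0 ≤ a → 0 ≤ b → a ≠ b → a.toNat ≠ b.toNat := by intro a b ha hb hne; omega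
    refine ⟨ihs, ?_, ?_⟩
    · intro j q y hne
      rw [ihne j q y (by push_neg at hne ⊢; intro h1 h2 x hx; exact hne h1 h2 x (by simp [hx]))]
      rw [hdp1z, hzne j q y (by push_neg at hne ⊢; intro h1 h2; exact hne h1 h2 x0 (by simp))]
    · intro x hxm
      rcases List.mem_cons.mp hxm with rfl | hxtl
      · -- x = x0 : cell written by the head step, untouched by the tail
        rw [ihne k.toNat p.toNat x.toNat ?side]
        case side =>
          rintro ⟨-, -, x', hx', hxx'⟩
          have hx0x : x ≠ x' := fun h => (List.nodup_cons.mp hnd).1 (h ▸ hx')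
          exact toNat_inj x x' hx00 (hmem x' (by simp [hx'])).1 hx0x hxx'
        rw [hdp1z, hzcell]
      · -- x in the tail
        obtain ⟨hx0, hx11⟩ := hmem x (by simp [hxtl])
        rw [ihcell x hxtl]
        have hcell1 : pvGet3 dp1 k.toNat p.toNat x.toNat = pvGet3 dp k.toNat p.toNat x.toNat := by
          rw [hdp1z, hzne k.toNat p.toNat x.toNat ?s2]
          case s2 =>
            rintro ⟨-, -, hxx0⟩
            exact toNat_inj x x0 hx0 hx00 (fun h => (List.nodup_cons.mp hnd).1 (h ▸ hxtl)) hxx0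
        have hterm : (PySem.List.pyRange 0 (min f_k p + 1) 1).map (pvTermA k f_k f_no_k p x dp1)
            = (PySem.List.pyRange 0 (min f_k p + 1) 1).map (pvTermA k f_k f_no_k p x dp) := by
          refine List.map_congr_left (fun z _ => ?_)
          unfold pvTermA
          rw [hdp1z, hzne (k.toNat + 1) _ _ (by omega)]
        rw [hcell1, hterm]

theorem pvRange_nil {a b : Int} (h : ¬ a < b) : PySem.List.pyRange a b 1 = [] := by
  simp [PySem.List.pyRange]; omega

theorem pvRange_nodup (a b : Int) : (PySem.List.pyRange a b 1).Nodup := by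
  suffices h : ∀ (m : Nat) (a b : Int), (b - a).toNat = m → (PySem.List.pyRange a b 1).Nodup by
    exact h (b - a).toNat a b rfl
  intro m
  induction m with
  | zero => intro a b hm; rw [pvRange_nil (by omega)]; exact List.nodup_nil
  | succ m ih =>
    intro a b hm
    by_cases hab : a < b
    · rw [PySem.List.pyRange_one_cons hab]
      refine List.nodup_cons.mpr ⟨fun hmem => ?_, ih (a + 1) b (by omega)⟩
      have := PySem.List.mem_pyRange_one.mp hmem
      omega
    · rw [pvRange_nil hab]; exact List.nodup_nil

theorem pvPfold (k f_k f_no_k : Int) (hk : 0 ≤ k) (hk10 : k.toNat < 10) (Pn : Nat) :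
    ∀ (ps : List Int) (dp : PvL3), pvShape Pn dp → ps.Nodup → (∀ p ∈ ps, 0 ≤ p ∧ p.toNat ≤ Pn) →
      pvShape Pn (ps.foldl (pvBodyP k f_k f_no_k) dp) ∧
      (∀ j q y, ¬(j = k.toNat ∧ ∃ p ∈ ps, q = p.toNat) →
        pvGet3 (ps.foldl (pvBodyP k f_k f_no_k) dp) j q y = pvGet3 dp j q y) ∧
      (∀ p ∈ ps, ∀ x : Int, 0 ≤ x → x.toNat < 11 →
        pvGet3 (ps.foldl (pvBodyP k f_k f_no_k) dp) k.toNat p.toNat x.toNat =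
          pvGet3 dp k.toNat p.toNat x.toNat +
            ((PySem.List.pyRange 0 (min f_k p + 1) 1).map (pvTermA k f_k f_no_k p x dp)).sum) := by
  intro ps
  induction ps with
  | nil => intro dp hdp _ _; exact ⟨hdp, fun _ _ _ _ => rfl, by simp⟩
  | cons p0 tl ih =>
    intro dp hdp hnd hmem
    obtain ⟨hp00, hp0P⟩ := hmem p0 (by simp)
    have hstep : tl.foldl (pvBodyP k f_k f_no_k) (pvBodyP k f_k f_no_k dp p0) =
        (p0 :: tl).foldl (pvBodyP k f_k f_no_k) dp := rfl
    set dp1 := pvBodyP k f_k f_no_k dp p0 with hdp1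
    have hxall : ∀ x ∈ PySem.List.pyRange 0 11 1, 0 ≤ x ∧ x.toNat < 11 := by decide
    have hxnd : (PySem.List.pyRange 0 11 1).Nodup := by decide
    have hx := pvXfold k f_k f_no_k p0 hk hk10 Pn hp00 hp0P (PySem.List.pyRange 0 11 1) dp hdp hxnd hxall
    obtain ⟨hxs, hxne, hxcell⟩ := hx
    have hdp1x : dp1 = (PySem.List.pyRange 0 11 1).foldl (pvBodyX k f_k f_no_k p0) dp := rfl
    obtain ⟨ihs, ihne, ihcell⟩ := ih dp1 (hdp1x ▸ hxs) hnd.of_cons (fun q hq => hmem q (by simp [hq]))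
    rw [← hstep]
    have toNat_inj : ∀ a b : Int, 0 ≤ a → 0 ≤ b → a ≠ b → a.toNat ≠ b.toNat := by intro a b ha hb hne; omega
    refine ⟨ihs, ?_, ?_⟩
    · intro j q y hne
      rw [ihne j q y (by push_neg at hne ⊢; intro h1 pp hpp; exact hne h1 pp (by simp [hpp]))]
      rw [hdp1x, hxne j q y ?s1]
      case s1 =>
        rintro ⟨h1, h2, -⟩
        exact (by push_neg at hne; exact hne h1 p0 (by simp) h2 : False)
    · intro p hpm x hx0 hx11
      rcases List.mem_cons.mp hpm with rfl | hptl
      · rw [ihne k.toNat p.toNat x.toNat ?side]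
        case side =>
          rintro ⟨-, p', hp', hpp'⟩
          have : p ≠ p' := fun h => (List.nodup_cons.mp hnd).1 (h ▸ hp')
          exact toNat_inj p p' hp00 (hmem p' (by simp [hp'])).1 this hpp'
        rw [hdp1x, hxcell x (PySem.List.mem_pyRange_one.mpr (by omega))]
      · obtain ⟨hp0, hpP⟩ := hmem p (by simp [hptl])
        rw [ihcell p hptl x hx0 hx11]
        have hcell1 : pvGet3 dp1 k.toNat p.toNat x.toNat = pvGet3 dp k.toNat p.toNat x.toNat := by
          rw [hdp1x, hxne k.toNat p.toNat x.toNat ?s2]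
          case s2 =>
            rintro ⟨-, hpp0, -⟩
            exact toNat_inj p p0 hp0 hp00 (fun h => (List.nodup_cons.mp hnd).1 (h ▸ hptl)) hpp0
        have hterm : (PySem.List.pyRange 0 (min f_k p + 1) 1).map (pvTermA k f_k f_no_k p x dp1)
            = (PySem.List.pyRange 0 (min f_k p + 1) 1).map (pvTermA k f_k f_no_k p x dp) := by
          refine List.map_congr_left (fun z _ => ?_)
          unfold pvTermA
          rw [hdp1x, hxne (k.toNat + 1) _ _ (by omega)]
        rw [hcell1, hterm]

theorem pvFoldl_if_add (l : List Int) (c : Int → Prop) [DecidablePred c] (h : Int → Int) :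
    ∀ a : Int, l.foldl (fun t z => if c z then t + h z else t) a
      = a + (l.map (fun z => if c z then h z else 0)).sum := by
  induction l with
  | nil => intro a; simp
  | cons z0 tl ih =>
    intro a
    simp only [List.foldl_cons, List.map_cons, List.sum_cons]
    by_cases hc : c z0
    · rw [if_pos hc, ih, if_pos hc]; ring
    · rw [if_neg hc, ih, if_neg hc]; ring

theorem pvCount_zero : ∀ (items : List (Int × Int)) (p x rest : Int),
    (items.map (·.2)).sum < p → pvCount items p x rest = 0 := by
  intro items
  induction items with
  | nil =>
    intro p x rest h
    simp only [List.map_nil, List.sum_nil] at h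
    unfold pvCount
    rw [if_neg (fun hc => by omega)]
  | cons df tl ih =>
    obtain ⟨d, f⟩ := df
    intro p x rest h
    simp only [List.map_cons, List.sum_cons] at h
    show (PySem.List.pyRange 0 (min f p + 1) 1).foldl _ 0 = 0
    rw [pvFoldl_if_add _ (fun z => f - z ≤ rest - p) _ 0, zero_add]
    refine List.sum_eq_zero (fun y hy => ?_)
    obtain ⟨z, hz, rfl⟩ := List.mem_map.mp hy
    obtain ⟨hz0, hz1⟩ := PySem.List.mem_pyRange_one.mp hz
    split_ifs with hg
    · rw [ih (p - z) (PySem.Int.mod (x + (2 * z - f) * d) 11) (rest - f) (by omega)]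
      ring
    · rfl

theorem pvNcr_eq_comb {nn rr : Int} (h0 : 0 ≤ rr) (h1 : rr ≤ nn) : pvNcr nn rr = pvComb nn rr := by
  unfold pvNcr pvComb
  rw [if_neg (by omega)]
  have hr : rr.toNat ≤ nn.toNat := by omega
  have hsub : (nn - rr).toNat = nn.toNat - rr.toNat := by omega
  rw [hsub,
    show ((Nat.factorial rr.toNat : Int) * (Nat.factorial (nn.toNat - rr.toNat) : Int))
      = ((Nat.factorial rr.toNat * Nat.factorial (nn.toNat - rr.toNat) : Nat) : Int) from by push_cast; ring,
    PySem.Int.floordiv_natCast, Nat.choose_eq_factorial_div_factorial hr]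

theorem pvStep_eq (kI f_k rest' : Int) (tail : List (Int × Int)) (p x : Int)
    (hfk0 : 0 ≤ f_k) (hp0 : 0 ≤ p) (hsum : (tail.map (·.2)).sum = rest') :
    ((PySem.List.pyRange 0 (min f_k p + 1) 1).map (fun z =>
        pvNcr p z * pvNcr ((f_k + rest') - p) (f_k - z) *
          pvCount tail (p - z) (PySem.Int.mod (x + (z * kI - (f_k - z) * kI)) 11) rest')).sum
      = pvCount ((kI, f_k) :: tail) p x (f_k + rest') := by
  show _ = (PySem.List.pyRange 0 (min f_k p + 1) 1).foldl _ 0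
  rw [pvFoldl_if_add _ (fun z => f_k - z ≤ (f_k + rest') - p) _ 0, zero_add]
  refine congrArg List.sum (List.map_congr_left (fun z hz => ?_)).symm
  obtain ⟨hz0, hz1⟩ := PySem.List.mem_pyRange_one.mp hz
  by_cases hg : f_k - z ≤ (f_k + rest') - p
  · rw [if_pos hg]
    rw [← pvNcr_eq_comb hz0 (by omega), ← pvNcr_eq_comb (by omega) hg]
    rw [show (2 * z - f_k) * kI = z * kI - (f_k - z) * kI from by ring,
        show f_k + rest' - f_k = rest' from by ring]
  · rw [if_neg hg,
        pvCount_zero tail (p - z) (PySem.Int.mod (x + (z * kI - (f_k - z) * kI)) 11) rest' (by omega)]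
    ring

def pvInv (pr : List (Int × Int)) (Pn : Nat) (k : Nat) (dp : PvL3) : Prop :=
  pvShape Pn dp ∧
  (∀ j, k ≤ j → j ≤ 10 → ∀ pn, pn ≤ Pn → ∀ xn, xn < 11 →
    pvGet3 dp j pn xn = pvCount (pr.drop j) ↑pn ↑xn ((pr.drop j).map (·.2)).sum) ∧
  (∀ j, j < k → ∀ pn, pn ≤ Pn → ∀ xn, xn < 11 → pvGet3 dp j pn xn = 0)

theorem pvGetD_oob {α : Type} (l : List α) (i : Nat) (d : α) (h : l.length ≤ i) :
    l.getD i d = d := by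
  rw [List.getD_eq_getElem?_getD, List.getElem?_eq_none h]; rfl

theorem pvGet3_zero3 (Pn : Nat) (j q y : Nat) :
    pvGet3 (List.replicate 11 (List.replicate (Pn + 1) (List.replicate 11 (0 : Int)))) j q y = 0 := by
  unfold pvGet3
  by_cases hj : j < 11
  · rw [List.getD_replicate _ hj]
    by_cases hq : q < Pn + 1
    · rw [List.getD_replicate _ hq]
      by_cases hy : y < 11
      · rw [List.getD_replicate _ hy]
      · rw [pvGetD_oob _ y 0 (by simp; omega)]
    · rw [pvGetD_oob _ q [] (by simp; omega), pvGetD_oob _ y 0 (by simp)]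
  · rw [pvGetD_oob _ j [] (by simp; omega), pvGetD_oob _ q [] (by simp), pvGetD_oob _ y 0 (by simp)]

theorem pvShape_zero3 (Pn : Nat) :
    pvShape Pn (List.replicate 11 (List.replicate (Pn + 1) (List.replicate 11 (0 : Int)))) := by
  refine ⟨by simp, fun j hj => ?_⟩
  rw [List.getD_replicate _ hj]
  exact ⟨by simp, fun q hq => by rw [List.getD_replicate _ hq]; simp⟩

theorem pvInv_base (pr : List (Int × Int)) (hlen : pr.length = 10) (Pn : Nat) :
    pvInv pr Pn 10
      (pvSet3 (List.replicate 11 (List.replicate (Pn + 1) (List.replicate 11 (0 : Int)))) 10 0 0 1) := by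
  have hsh0 := pvShape_zero3 Pn
  refine ⟨pvShape_set3 hsh0 10 0 0 1, ?_, ?_⟩
  · intro j h10j hj10 pn hpn xn hxn
    have hj : j = 10 := by omega
    subst hj
    have hdrop : pr.drop 10 = [] := List.drop_eq_nil_of_le (by omega)
    rw [hdrop]
    show _ = pvCount [] ↑pn ↑xn _
    unfold pvCount
    by_cases hz : pn = 0 ∧ xn = 0
    · obtain ⟨rfl, rfl⟩ := hz
      rw [pvGet3_set3_self hsh0 1 (by omega) (by omega) (by omega), if_pos (by simp)]
    · rw [pvGet3_set3_ne 1 (by rintro ⟨-, h1, h2⟩; exact hz ⟨h1.symm, h2.symm⟩),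
          pvGet3_zero3, if_neg (by simp; omega)]
  · intro j hj pn _ xn _
    rw [pvGet3_set3_ne 1 (by omega), pvGet3_zero3]

theorem pvLayer_step (pr : List (Int × Int)) (Pn : Nat) (F : List Int) (P : Int)
    (hPn : P.toNat = Pn) (hP0 : 0 ≤ P)
    (kI : Int) (hkI0 : 0 ≤ kI) (k : Nat) (hkI : kI.toNat = k) (hk : k < 10)
    (f_k : Int) (hfk : PySem.List.pyGetD F kI 0 = f_k) (hfk0 : 0 ≤ f_k)
    (hfno : ((PySem.List.pyRange kI 10 1).map (fun i => PySem.List.pyGetD F i 0)).foldl (· + ·) 0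
            = f_k + ((pr.drop (k + 1)).map (·.2)).sum)
    (hpair : pr.drop k = (kI, f_k) :: pr.drop (k + 1))
    (dp : PvL3) (h : pvInv pr Pn (k + 1) dp) :
    pvInv pr Pn k (pvBodyK F P dp kI) := by
  obtain ⟨hsh, hge, hlt⟩ := h
  have hbk : pvBodyK F P dp kI = (PySem.List.pyRange 0 (P + 1) 1).foldl
      (pvBodyP kI f_k (f_k + ((pr.drop (k + 1)).map (·.2)).sum)) dp := by
    unfold pvBodyK
    rw [hfk, hfno]
  rw [hbk]
  set ts : Int := ((pr.drop (k + 1)).map (·.2)).sum with hts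
  have hmem : ∀ p ∈ PySem.List.pyRange 0 (P + 1) 1, 0 ≤ p ∧ p.toNat ≤ Pn := by
    intro p hp
    have := PySem.List.mem_pyRange_one.mp hp
    omega
  obtain ⟨hs, hne, hcell⟩ := pvPfold kI f_k (f_k + ts) hkI0 (by omega) Pn
    (PySem.List.pyRange 0 (P + 1) 1) dp hsh (pvRange_nodup 0 (P + 1)) hmem
  refine ⟨hs, ?_, ?_⟩
  · intro j hkj hj10 pn hpn xn hxn
    by_cases hjk : j = k
    · subst hjk
      have hpm : (↑pn : Int) ∈ PySem.List.pyRange 0 (P + 1) 1 :=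
        PySem.List.mem_pyRange_one.mpr ⟨by omega, by omega⟩
      have hc := hcell ↑pn hpm ↑xn (by omega) (by omega)
      rw [hkI, Int.toNat_natCast, Int.toNat_natCast] at hc
      rw [hc, hlt j (by omega) pn hpn xn hxn, zero_add]
      have hmapeq : (PySem.List.pyRange 0 (min f_k ↑pn + 1) 1).map
            (pvTermA kI f_k (f_k + ts) ↑pn ↑xn dp)
          = (PySem.List.pyRange 0 (min f_k ↑pn + 1) 1).map (fun z =>
              pvNcr ↑pn z * pvNcr ((f_k + ts) - ↑pn) (f_k - z) *
                pvCount (pr.drop (j + 1)) (↑pn - z)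
                  (PySem.Int.mod (↑xn + (z * kI - (f_k - z) * kI)) 11) ts) := by
        refine List.map_congr_left (fun z hz => ?_)
        obtain ⟨hz0, hz1⟩ := PySem.List.mem_pyRange_one.mp hz
        unfold pvTermA
        rw [hkI]
        have hmod0 : 0 ≤ PySem.Int.mod (↑xn + (z * kI - (f_k - z) * kI)) 11 :=
          PySem.Int.mod_nonneg _ (by norm_num)
        have hmod11 : PySem.Int.mod (↑xn + (z * kI - (f_k - z) * kI)) 11 < 11 :=
          PySem.Int.mod_lt _ (by norm_num)
        rw [hge (j + 1) (by omega) (by omega) (↑pn - z).toNat (by omega)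
          (PySem.Int.mod (↑xn + (z * kI - (f_k - z) * kI)) 11).toNat (by omega)]
        rw [Int.toNat_of_nonneg (by omega : (0:Int) ≤ ↑pn - z), Int.toNat_of_nonneg hmod0, ← hts]
      rw [hmapeq]
      have hstep := pvStep_eq kI f_k ts (pr.drop (j + 1)) ↑pn ↑xn hfk0 (by omega) rfl
      rw [hstep, ← hpair, show ((pr.drop j).map (·.2)).sum = f_k + ts from by
        rw [hpair]; simp [hts]]
    · rw [hne j pn xn (by rintro ⟨hj, -⟩; rw [hkI] at hj; exact hjk hj)]
      exact hge j (by omega) hj10 pn hpn xn hxn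
  · intro j hjk pn hpn xn hxn
    rw [hne j pn xn (by rintro ⟨hj, -⟩; rw [hkI] at hj; omega)]
    exact hlt j (by omega) pn hpn xn hxn

theorem pvCountGo_single (c : Char) : ∀ (fuel : Nat) (l : List Char) (acc : Nat), l.length ≤ fuel →
    PySem.Chars.count.go [c] fuel l acc = acc + l.count c := by
  intro fuel
  induction fuel with
  | zero =>
    intro l acc h
    have : l = [] := List.eq_nil_of_length_eq_zero (by omega)
    subst this
    simp [PySem.Chars.count.go]
  | succ fuel ih =>
    intro l acc h
    cases l with
    | nil => simp [PySem.Chars.count.go]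
    | cons hd t =>
      rw [PySem.Chars.count.go]
      have hpre : [c].isPrefixOf (hd :: t) = (c == hd) := by simp [List.isPrefixOf]
      rw [hpre]
      simp only [List.length_singleton, List.drop_succ_cons, List.drop_zero]
      by_cases hc : c = hd
      · rw [if_pos (by simp [hc]), ih t (acc + 1) (by simp at h; omega), List.count_cons]
        simp [hc]
        omega
      · rw [if_neg (by simp [hc]), ih t acc (by simp at h; omega), List.count_cons]
        simp [Ne.symm hc]

theorem pvCount_single (l : List Char) (c : Char) : PySem.Chars.count l [c] = l.count c := by
  unfold PySem.Chars.count
  rw [if_neg (by simp)]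
  simpa using pvCountGo_single c l.length l 0 (le_refl _)

def pvFc (n : String) : List Int :=
  [(n.toList.count '0' : Int), (n.toList.count '1' : Int), (n.toList.count '2' : Int),
   (n.toList.count '3' : Int), (n.toList.count '4' : Int), (n.toList.count '5' : Int),
   (n.toList.count '6' : Int), (n.toList.count '7' : Int), (n.toList.count '8' : Int),
   (n.toList.count '9' : Int)]

theorem pvFA (n : String) :
    (PySem.List.pyRange 0 10 1).map (fun i => (PySem.Str.count n (PySem.Int.toStr i) : Int))
      = pvFc n := by
  rw [show PySem.List.pyRange 0 10 1 = [0,1,2,3,4,5,6,7,8,9] from by decide]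
  simp only [List.map_cons, List.map_nil]
  rw [show PySem.Int.toStr 0 = "0" from by decide, show PySem.Int.toStr 1 = "1" from by decide,
      show PySem.Int.toStr 2 = "2" from by decide, show PySem.Int.toStr 3 = "3" from by decide,
      show PySem.Int.toStr 4 = "4" from by decide, show PySem.Int.toStr 5 = "5" from by decide,
      show PySem.Int.toStr 6 = "6" from by decide, show PySem.Int.toStr 7 = "7" from by decide,
      show PySem.Int.toStr 8 = "8" from by decide, show PySem.Int.toStr 9 = "9" from by decide]
  simp only [PySem.Str.count_eq]
  rw [show ("0" : String).toList = ['0'] from rfl, show ("1" : String).toList = ['1'] from rfl,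
      show ("2" : String).toList = ['2'] from rfl, show ("3" : String).toList = ['3'] from rfl,
      show ("4" : String).toList = ['4'] from rfl, show ("5" : String).toList = ['5'] from rfl,
      show ("6" : String).toList = ['6'] from rfl, show ("7" : String).toList = ['7'] from rfl,
      show ("8" : String).toList = ['8'] from rfl, show ("9" : String).toList = ['9'] from rfl]
  simp only [pvCount_single]
  rfl

theorem pvChar_toNat_inj {c d : Char} (h : c.toNat = d.toNat) : c = d :=
  Char.ext (by unfold Char.toNat at h; exact UInt32.toNat_inj.mp h)

theorem pvDigit_cond (c : Char) : ('0' ≤ c ∧ c ≤ '9') ↔ (48 ≤ c.toNat ∧ c.toNat ≤ 57) := by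
  rw [Char.le_def, Char.le_def]
  unfold Char.toNat
  constructor <;> intro h <;>
    exact ⟨by have := h.1; first
            | exact_mod_cast UInt32.le_iff_toNat_le.mp this
            | exact UInt32.le_iff_toNat_le.mpr (by exact_mod_cast this),
           by have := h.2; first
            | exact_mod_cast UInt32.le_iff_toNat_le.mp this
            | exact UInt32.le_iff_toNat_le.mpr (by exact_mod_cast this)⟩

theorem pvOfNat_digit_toNat {d : Nat} (h : d < 10) : (Char.ofNat (48 + d)).toNat = 48 + d := by
  rw [Char.toNat_ofNat, if_pos (Or.inl (by omega))]

theorem pvTally_go (l : List Char) : ∀ (F0 : List Int), F0.length = 10 →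
    (l.foldl (fun F c => if '0' ≤ c ∧ c ≤ '9' then F.modify (c.toNat - 48) (· + 1) else F) F0).length = 10 ∧
    ∀ d, d < 10 →
      (l.foldl (fun F c => if '0' ≤ c ∧ c ≤ '9' then F.modify (c.toNat - 48) (· + 1) else F) F0).getD d 0
        = F0.getD d 0 + (l.count (Char.ofNat (48 + d)) : Int) := by
  induction l with
  | nil => intro F0 hF0; exact ⟨hF0, fun d _ => by simp⟩
  | cons c t ih =>
    intro F0 hF0
    simp only [List.foldl_cons]
    set F1 := if '0' ≤ c ∧ c ≤ '9' then F0.modify (c.toNat - 48) (· + 1) else F0 with hF1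
    have hF1len : F1.length = 10 := by
      rw [hF1]; split_ifs <;> simp [hF0]
    obtain ⟨ihlen, ihd⟩ := ih F1 hF1len
    refine ⟨ihlen, fun d hd => ?_⟩
    rw [ihd d hd]
    have hcnt : ((c :: t).count (Char.ofNat (48 + d)) : Int)
        = (t.count (Char.ofNat (48 + d)) : Int) + (if c = Char.ofNat (48 + d) then 1 else 0) := by
      by_cases he : c = Char.ofNat (48 + d) <;>
        simp [List.count_cons, he] <;> push_cast <;> ring
    rw [hcnt]
    have hF1d : F1.getD d 0 = F0.getD d 0 + (if c = Char.ofNat (48 + d) then 1 else 0) := by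
      rw [hF1]
      by_cases hdig : '0' ≤ c ∧ c ≤ '9'
      · rw [if_pos hdig, pvGetD_modify]
        have hrange := (pvDigit_cond c).mp hdig
        by_cases heq : c = Char.ofNat (48 + d)
        · have : c.toNat = 48 + d := by rw [heq]; exact pvOfNat_digit_toNat hd
          rw [if_pos ⟨by omega, by omega⟩, if_pos heq]
        · have hne : c.toNat - 48 ≠ d := by
            intro hcontra
            exact heq (pvChar_toNat_inj (by rw [pvOfNat_digit_toNat hd]; omega))
          rw [if_neg (by tauto), if_neg heq]
          ring
      · rw [if_neg hdig, if_neg (fun heq => hdig ((pvDigit_cond c).mpr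
          (by rw [heq, pvOfNat_digit_toNat hd]; omega)))]
        ring
    rw [hF1d]
    ring

def pvPairs (n : String) : List (Int × Int) := PySem.List.enumerate (pvFc n)

theorem pvPairs_eq (n : String) : pvPairs n =
    [(0, (n.toList.count '0' : Int)), (1, (n.toList.count '1' : Int)),
     (2, (n.toList.count '2' : Int)), (3, (n.toList.count '3' : Int)),
     (4, (n.toList.count '4' : Int)), (5, (n.toList.count '5' : Int)),
     (6, (n.toList.count '6' : Int)), (7, (n.toList.count '7' : Int)),
     (8, (n.toList.count '8' : Int)), (9, (n.toList.count '9' : Int))] := by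
  simp [pvPairs, PySem.List.enumerate, pvFc]

theorem pvTally_eq (n : String) : pvTally n = pvFc n := by
  obtain ⟨hlen, hd⟩ := pvTally_go n.toList (List.replicate 10 0) (by simp)
  unfold pvTally
  refine List.ext_getElem (by rw [hlen]; rfl) ?_
  intro i hi1 hi2
  have hi10 : i < 10 := by rw [hlen] at hi1; exact hi1
  have hgetD : ∀ (l : List Int) (i : Nat) (h : i < l.length), l[i] = l.getD i 0 := by
    intro l i h; rw [List.getD_eq_getElem?_getD, List.getElem?_eq_getElem h]; rfl
  rw [hgetD _ i hi1, hgetD _ i hi2, hd i hi10, List.getD_replicate _ hi10, zero_add]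
  interval_cases i <;> rfl

theorem pvSum_eq (n : String) : ((pvPairs n).map (·.2)).sum = (pvFc n).foldl (· + ·) 0 := by
  rw [pvPairs_eq]
  simp [pvFc]
  ring

theorem pvMain (n : String) : friendly_naive n = friendly_naive_alt n := by
  have hpr := pvPairs_eq n
  simp only [friendly_naive, friendly_naive_alt]
  rw [pvTally_eq n, pvFA n, PySem.Str.len_eq]
  set P : Int := PySem.Int.floordiv ((n.toList.length : Int) + 1) 2 with hP
  have hP0 : 0 ≤ P := by
    rw [hP, show ((n.toList.length : Int) + 1) = ((n.toList.length + 1 : Nat) : Int) from by push_cast; ring,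
        show (2 : Int) = ((2 : Nat) : Int) from rfl, PySem.Int.floordiv_natCast]
    positivity
  have hPtoNat : ((P.toNat : Int)) = P := Int.toNat_of_nonneg hP0
  rw [show PySem.List.pyRange 9 (-1) (-1) = [9, 8, 7, 6, 5, 4, 3, 2, 1, 0] from by decide]
  simp only [List.foldl_cons, List.foldl_nil]
  have h10 := pvInv_base (pvPairs n) (by rw [hpr]; rfl) P.toNat
  have h9 := pvLayer_step (pvPairs n) P.toNat (pvFc n) P rfl hP0 9 (by norm_num) 9 rfl (by norm_num)
    (n.toList.count '9' : Int) rfl (by positivity)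
    (by rw [show PySem.List.pyRange (9:Int) 10 1 = [9] from by decide, hpr]
        simp only [List.map_cons, List.map_nil, List.foldl_cons, List.foldl_nil]
        rw [show PySem.List.pyGetD (pvFc n) 9 0 = (n.toList.count '9' : Int) from rfl]
        simp)
    (by rw [hpr]; rfl) _ h10
  have h8 := pvLayer_step (pvPairs n) P.toNat (pvFc n) P rfl hP0 8 (by norm_num) 8 rfl (by norm_num)
    (n.toList.count '8' : Int) rfl (by positivity)
    (by rw [show PySem.List.pyRange (8:Int) 10 1 = [8, 9] from by decide, hpr]
        simp only [List.map_cons, List.map_nil, List.foldl_cons, List.foldl_nil]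
        rw [show PySem.List.pyGetD (pvFc n) 8 0 = (n.toList.count '8' : Int) from rfl,
            show PySem.List.pyGetD (pvFc n) 9 0 = (n.toList.count '9' : Int) from rfl]
        simp; try ring)
    (by rw [hpr]; rfl) _ h9
  have h7 := pvLayer_step (pvPairs n) P.toNat (pvFc n) P rfl hP0 7 (by norm_num) 7 rfl (by norm_num)
    (n.toList.count '7' : Int) rfl (by positivity)
    (by rw [show PySem.List.pyRange (7:Int) 10 1 = [7, 8, 9] from by decide, hpr]
        simp only [List.map_cons, List.map_nil, List.foldl_cons, List.foldl_nil]
        rw [show PySem.List.pyGetD (pvFc n) 7 0 = (n.toList.count '7' : Int) from rfl,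
            show PySem.List.pyGetD (pvFc n) 8 0 = (n.toList.count '8' : Int) from rfl,
            show PySem.List.pyGetD (pvFc n) 9 0 = (n.toList.count '9' : Int) from rfl]
        simp; try ring)
    (by rw [hpr]; rfl) _ h8
  have h6 := pvLayer_step (pvPairs n) P.toNat (pvFc n) P rfl hP0 6 (by norm_num) 6 rfl (by norm_num)
    (n.toList.count '6' : Int) rfl (by positivity)
    (by rw [show PySem.List.pyRange (6:Int) 10 1 = [6, 7, 8, 9] from by decide, hpr]
        simp only [List.map_cons, List.map_nil, List.foldl_cons, List.foldl_nil]
        rw [show PySem.List.pyGetD (pvFc n) 6 0 = (n.toList.count '6' : Int) from rfl,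
            show PySem.List.pyGetD (pvFc n) 7 0 = (n.toList.count '7' : Int) from rfl,
            show PySem.List.pyGetD (pvFc n) 8 0 = (n.toList.count '8' : Int) from rfl,
            show PySem.List.pyGetD (pvFc n) 9 0 = (n.toList.count '9' : Int) from rfl]
        simp; try ring)
    (by rw [hpr]; rfl) _ h7
  have h5 := pvLayer_step (pvPairs n) P.toNat (pvFc n) P rfl hP0 5 (by norm_num) 5 rfl (by norm_num)
    (n.toList.count '5' : Int) rfl (by positivity)
    (by rw [show PySem.List.pyRange (5:Int) 10 1 = [5, 6, 7, 8, 9] from by decide, hpr]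
        simp only [List.map_cons, List.map_nil, List.foldl_cons, List.foldl_nil]
        rw [show PySem.List.pyGetD (pvFc n) 5 0 = (n.toList.count '5' : Int) from rfl,
            show PySem.List.pyGetD (pvFc n) 6 0 = (n.toList.count '6' : Int) from rfl,
            show PySem.List.pyGetD (pvFc n) 7 0 = (n.toList.count '7' : Int) from rfl,
            show PySem.List.pyGetD (pvFc n) 8 0 = (n.toList.count '8' : Int) from rfl,
            show PySem.List.pyGetD (pvFc n) 9 0 = (n.toList.count '9' : Int) from rfl]
        simp; try ring)
    (by rw [hpr]; rfl) _ h6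
  have h4 := pvLayer_step (pvPairs n) P.toNat (pvFc n) P rfl hP0 4 (by norm_num) 4 rfl (by norm_num)
    (n.toList.count '4' : Int) rfl (by positivity)
    (by rw [show PySem.List.pyRange (4:Int) 10 1 = [4, 5, 6, 7, 8, 9] from by decide, hpr]
        simp only [List.map_cons, List.map_nil, List.foldl_cons, List.foldl_nil]
        rw [show PySem.List.pyGetD (pvFc n) 4 0 = (n.toList.count '4' : Int) from rfl,
            show PySem.List.pyGetD (pvFc n) 5 0 = (n.toList.count '5' : Int) from rfl,
            show PySem.List.pyGetD (pvFc n) 6 0 = (n.toList.count '6' : Int) from rfl,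
            show PySem.List.pyGetD (pvFc n) 7 0 = (n.toList.count '7' : Int) from rfl,
            show PySem.List.pyGetD (pvFc n) 8 0 = (n.toList.count '8' : Int) from rfl,
            show PySem.List.pyGetD (pvFc n) 9 0 = (n.toList.count '9' : Int) from rfl]
        simp; try ring)
    (by rw [hpr]; rfl) _ h5
  have h3 := pvLayer_step (pvPairs n) P.toNat (pvFc n) P rfl hP0 3 (by norm_num) 3 rfl (by norm_num)
    (n.toList.count '3' : Int) rfl (by positivity)
    (by rw [show PySem.List.pyRange (3:Int) 10 1 = [3, 4, 5, 6, 7, 8, 9] from by decide, hpr]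
        simp only [List.map_cons, List.map_nil, List.foldl_cons, List.foldl_nil]
        rw [show PySem.List.pyGetD (pvFc n) 3 0 = (n.toList.count '3' : Int) from rfl,
            show PySem.List.pyGetD (pvFc n) 4 0 = (n.toList.count '4' : Int) from rfl,
            show PySem.List.pyGetD (pvFc n) 5 0 = (n.toList.count '5' : Int) from rfl,
            show PySem.List.pyGetD (pvFc n) 6 0 = (n.toList.count '6' : Int) from rfl,
            show PySem.List.pyGetD (pvFc n) 7 0 = (n.toList.count '7' : Int) from rfl,
            show PySem.List.pyGetD (pvFc n) 8 0 = (n.toList.count '8' : Int) from rfl,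
            show PySem.List.pyGetD (pvFc n) 9 0 = (n.toList.count '9' : Int) from rfl]
        simp; try ring)
    (by rw [hpr]; rfl) _ h4
  have h2 := pvLayer_step (pvPairs n) P.toNat (pvFc n) P rfl hP0 2 (by norm_num) 2 rfl (by norm_num)
    (n.toList.count '2' : Int) rfl (by positivity)
    (by rw [show PySem.List.pyRange (2:Int) 10 1 = [2, 3, 4, 5, 6, 7, 8, 9] from by decide, hpr]
        simp only [List.map_cons, List.map_nil, List.foldl_cons, List.foldl_nil]
        rw [show PySem.List.pyGetD (pvFc n) 2 0 = (n.toList.count '2' : Int) from rfl,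
            show PySem.List.pyGetD (pvFc n) 3 0 = (n.toList.count '3' : Int) from rfl,
            show PySem.List.pyGetD (pvFc n) 4 0 = (n.toList.count '4' : Int) from rfl,
            show PySem.List.pyGetD (pvFc n) 5 0 = (n.toList.count '5' : Int) from rfl,
            show PySem.List.pyGetD (pvFc n) 6 0 = (n.toList.count '6' : Int) from rfl,
            show PySem.List.pyGetD (pvFc n) 7 0 = (n.toList.count '7' : Int) from rfl,
            show PySem.List.pyGetD (pvFc n) 8 0 = (n.toList.count '8' : Int) from rfl,
            show PySem.List.pyGetD (pvFc n) 9 0 = (n.toList.count '9' : Int) from rfl]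
        simp; try ring)
    (by rw [hpr]; rfl) _ h3
  have h1 := pvLayer_step (pvPairs n) P.toNat (pvFc n) P rfl hP0 1 (by norm_num) 1 rfl (by norm_num)
    (n.toList.count '1' : Int) rfl (by positivity)
    (by rw [show PySem.List.pyRange (1:Int) 10 1 = [1, 2, 3, 4, 5, 6, 7, 8, 9] from by decide, hpr]
        simp only [List.map_cons, List.map_nil, List.foldl_cons, List.foldl_nil]
        rw [show PySem.List.pyGetD (pvFc n) 1 0 = (n.toList.count '1' : Int) from rfl,
            show PySem.List.pyGetD (pvFc n) 2 0 = (n.toList.count '2' : Int) from rfl,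
            show PySem.List.pyGetD (pvFc n) 3 0 = (n.toList.count '3' : Int) from rfl,
            show PySem.List.pyGetD (pvFc n) 4 0 = (n.toList.count '4' : Int) from rfl,
            show PySem.List.pyGetD (pvFc n) 5 0 = (n.toList.count '5' : Int) from rfl,
            show PySem.List.pyGetD (pvFc n) 6 0 = (n.toList.count '6' : Int) from rfl,
            show PySem.List.pyGetD (pvFc n) 7 0 = (n.toList.count '7' : Int) from rfl,
            show PySem.List.pyGetD (pvFc n) 8 0 = (n.toList.count '8' : Int) from rfl,
            show PySem.List.pyGetD (pvFc n) 9 0 = (n.toList.count '9' : Int) from rfl]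
        simp; try ring)
    (by rw [hpr]; rfl) _ h2
  have h0 := pvLayer_step (pvPairs n) P.toNat (pvFc n) P rfl hP0 0 (by norm_num) 0 rfl (by norm_num)
    (n.toList.count '0' : Int) rfl (by positivity)
    (by rw [show PySem.List.pyRange (0:Int) 10 1 = [0, 1, 2, 3, 4, 5, 6, 7, 8, 9] from by decide, hpr]
        simp only [List.map_cons, List.map_nil, List.foldl_cons, List.foldl_nil]
        rw [show PySem.List.pyGetD (pvFc n) 0 0 = (n.toList.count '0' : Int) from rfl,
            show PySem.List.pyGetD (pvFc n) 1 0 = (n.toList.count '1' : Int) from rfl,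
            show PySem.List.pyGetD (pvFc n) 2 0 = (n.toList.count '2' : Int) from rfl,
            show PySem.List.pyGetD (pvFc n) 3 0 = (n.toList.count '3' : Int) from rfl,
            show PySem.List.pyGetD (pvFc n) 4 0 = (n.toList.count '4' : Int) from rfl,
            show PySem.List.pyGetD (pvFc n) 5 0 = (n.toList.count '5' : Int) from rfl,
            show PySem.List.pyGetD (pvFc n) 6 0 = (n.toList.count '6' : Int) from rfl,
            show PySem.List.pyGetD (pvFc n) 7 0 = (n.toList.count '7' : Int) from rfl,
            show PySem.List.pyGetD (pvFc n) 8 0 = (n.toList.count '8' : Int) from rfl,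
            show PySem.List.pyGetD (pvFc n) 9 0 = (n.toList.count '9' : Int) from rfl]
        simp; try ring)
    (by rw [hpr]; rfl) _ h1
  have hread := h0.2.1 0 (by omega) (by omega) P.toNat (le_refl _) 0 (by omega)
  rw [List.drop_zero] at hread
  rw [hread, hPtoNat]
  show pvCount (pvPairs n) P ((0:Nat):Int) _ = _
  rw [Nat.cast_zero, pvSum_eq n]
  rfl

-- ===== VERDICT (by name: the statement is the Claim_ definition above) =====
theorem friendly_naive_spec : Claim_equal_friendly_naive := by
  intro n _
  unfold Spec_friendly_naive
  exact pvMain n
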